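-- pv_equiv track=rewrite | github.com/SudsyHickory/Karolewski_Karaskiewicz-python | list_2/src/longest_sentence_different_letters.py | has_different_starting_letter
-- ===== SOURCE A (Python) =====
-- def has_different_starting_letter(sentence):
--
--     previous_first_letter = ""
--
--     for word in sentence.split():
--
--         current_first_letter = ""
--
--         for char in word:
--             if char.isalpha():
--                 current_first_letter = char.lower()
--                 break
--
--         if current_first_letter != "":
--             if current_first_letter == previous_first_letter:
--                 return False
--             previous_first_letter = current_first_letter
--
--     return True
-- ===== SOURCE B (Python) =====
-- def has_different_starting_letter(sentence):
--     # Phase 1: concatenate each word's first alphabetic character (letterless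
--     # words contribute the empty string) and lowercase the whole thing once.
--     firsts = ''.join(next((c for c in w if c.isalpha()), '')
--                      for w in sentence.split()).lower()
--     # Phase 2: the sequence has two equal consecutive letters iff some doubled
--     # character "cc" occurs as a substring of firsts.
--     return all(c + c not in firsts for c in firsts)
-- ===== Notes on version B (the rewrite author's own statement) =====
-- stated objective: alternative
-- what changed: Replaces A's stateful scan with a previous-letter register and early return by a stateless formulation: concatenate first letters into one string and decide the property as 'no doubled character cc occurs as a substring', i.e. adjacency is checked by substring search instead of carried loop state.
import Mathlib
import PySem

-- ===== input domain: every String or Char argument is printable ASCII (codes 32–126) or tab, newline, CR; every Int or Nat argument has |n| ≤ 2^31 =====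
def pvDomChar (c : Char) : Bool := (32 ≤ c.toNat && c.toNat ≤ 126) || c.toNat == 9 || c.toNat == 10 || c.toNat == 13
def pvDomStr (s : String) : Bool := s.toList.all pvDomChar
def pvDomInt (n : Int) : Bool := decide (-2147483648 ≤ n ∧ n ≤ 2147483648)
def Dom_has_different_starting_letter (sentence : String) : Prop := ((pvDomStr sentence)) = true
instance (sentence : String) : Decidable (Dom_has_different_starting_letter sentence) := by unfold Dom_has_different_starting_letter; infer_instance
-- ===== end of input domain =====

-- B replaces A's stateful scan (previous-letter register + early return) by a stateless
-- formulation: join the first letters into one string and check no doubled substring "cc" occurs.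


-- ===== PORT A =====
-- A's inner loop: scan the word's chars, on the first alphabetic one store char.lower() and break.
def pvA_first : List Char → String
  | [] => ""
  | c :: rest =>
      if PySem.Chars.isalpha c then PySem.Str.lower (String.ofList [c]) else pvA_first rest

-- A's outer loop with the early `return False` modelled as recursion; state = previous_first_letter.
def pvA_loop : List String → String → Bool
  | [], _ => true
  | w :: ws, prev =>
      let cf := pvA_first w.toList
      if cf ≠ "" then
        if cf = prev then false else pvA_loop ws cf
      else pvA_loop ws prev

def has_different_starting_letter (sentence : String) : Bool :=
  pvA_loop (PySem.Str.split₀ sentence) ""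

-- ===== PORT B =====
-- next((c for c in w if c.isalpha()), '') — the word's first alphabetic char, as a 0/1-char list
def pvB_firstChar : List Char → List Char
  | [] => []
  | c :: rest => if PySem.Chars.isalpha c then [c] else pvB_firstChar rest

-- ''.join(… for w in sentence.split()).lower(); then the doubled-substring check.
-- Python's substring test `c + c in firsts` is exactly infix on the char list (List.isInfixOf).
def has_different_starting_letter_alt (sentence : String) : Bool :=
  let firsts := (PySem.Str.lower (String.ofList
      (((PySem.Str.split₀ sentence).map (fun w => pvB_firstChar w.toList)).flatten))).toList
  firsts.all (fun c => !(decide ([c, c] <:+: firsts)))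

-- ===== PRECONDITION & SPEC =====
def Spec_has_different_starting_letter (sentence : String) (out : Bool) : Prop := out = has_different_starting_letter_alt sentence
instance (sentence : String) (out : Bool) : Decidable (Spec_has_different_starting_letter sentence out) := by unfold Spec_has_different_starting_letter; infer_instance

-- ===== CLAIM =====
def Claim_equal_has_different_starting_letter : Prop := ∀ (sentence : String), Dom_has_different_starting_letter sentence → Spec_has_different_starting_letter sentence (has_different_starting_letter sentence)

-- ===== LEMMAS AND PROOFS =====

-- "no two adjacent equal characters", the common intermediate form
def pvNoAdj : List Char → Bool
  | [] => true
  | [_] => true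
  | a :: b :: rest => if a = b then false else pvNoAdj (b :: rest)

-- A's chain with an optional previous character (none = the "" sentinel)
def pvChainO : Option Char → List Char → Bool
  | _, [] => true
  | p, c :: cs => if some c = p then false else pvChainO (some c) cs

def pvEnc : Option Char → String
  | none => ""
  | some d => String.ofList [d]

theorem pvEnc_ne_empty (d : Char) : pvEnc (some d) ≠ "" := by
  intro h
  have h2 := congrArg String.toList h
  simp [pvEnc] at h2

theorem pvEnc_inj (a b : Char) : pvEnc (some a) = pvEnc (some b) ↔ a = b := by
  constructor
  · intro h
    have h2 := congrArg String.toList h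
    simpa [pvEnc] using h2
  · intro h; rw [h]

theorem pvEnc_eq_iff (d : Char) (p : Option Char) :
    (pvEnc (some d) = pvEnc p) ↔ some d = p := by
  cases p with
  | none => exact iff_of_false (pvEnc_ne_empty d) (by simp)
  | some e => rw [pvEnc_inj]; simp

theorem pvA_first_eq (cs : List Char) :
    pvA_first cs = match pvB_firstChar cs with
      | [] => ""
      | c :: _ => pvEnc (some (PySem.Chars.lowerChar c)) := by
  induction cs with
  | nil => simp [pvA_first, pvB_firstChar]
  | cons c rest ih =>
      by_cases h : PySem.Chars.isalpha c = true
      · have : PySem.Str.lower (String.ofList [c]) = pvEnc (some (PySem.Chars.lowerChar c)) := by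
          apply String.toList_injective
          simp [pvEnc, PySem.Str.toList_lower, PySem.Chars.lower]
        simp [pvA_first, pvB_firstChar, h, this]
      · simp [pvA_first, pvB_firstChar, h, ih]

-- A's outer loop equals the optional-previous chain over the lowered first letters
theorem pvLoop_eq_chain (ws : List String) :
    ∀ p, pvA_loop ws (pvEnc p) =
      pvChainO p ((ws.map (fun w => (pvB_firstChar w.toList).map PySem.Chars.lowerChar)).flatten) := by
  induction ws with
  | nil => intro p; simp [pvA_loop, pvChainO]
  | cons w rest ih =>
      intro p
      cases h : pvB_firstChar w.toList with
      | nil =>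
          have h1 : pvA_first w.toList = "" := by rw [pvA_first_eq, h]
          cases p with
          | none => simpa [pvA_loop, h1, pvEnc, h] using ih none
          | some d => simpa [pvA_loop, h1, pvEnc_ne_empty d, pvEnc, h] using ih (some d)
      | cons c tl =>
          have htl : tl = [] := by
            have hsh : ∀ cs, pvB_firstChar cs = [] ∨ ∃ x, pvB_firstChar cs = [x] := by
              intro cs
              induction cs with
              | nil => left; rfl
              | cons y ys ihy =>
                  by_cases hy : PySem.Chars.isalpha y = true
                  · right; exact ⟨y, by simp [pvB_firstChar, hy]⟩
                  · simpa [pvB_firstChar, hy] using ihy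
            rcases hsh w.toList with h0 | ⟨x, hx⟩
            · rw [h] at h0; exact absurd h0 (by simp)
            · rw [h] at hx; exact (List.cons.injEq .. ▸ hx).2
          subst htl
          have h1 : pvA_first w.toList = pvEnc (some (PySem.Chars.lowerChar c)) := by
            rw [pvA_first_eq, h]
          simp only [pvA_loop, h1, h, List.map_cons, List.flatten_cons, List.map_nil,
            List.singleton_append, pvChainO]
          rw [if_pos (pvEnc_ne_empty (PySem.Chars.lowerChar c))]
          by_cases hp : some (PySem.Chars.lowerChar c) = p
          · rw [if_pos ((pvEnc_eq_iff _ _).mpr hp), if_pos hp]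
          · rw [if_neg (fun hh => hp ((pvEnc_eq_iff _ _).mp hh)), if_neg hp,
              ih (some (PySem.Chars.lowerChar c))]

theorem pvChainO_some (l : List Char) : ∀ a, pvChainO (some a) l = pvNoAdj (a :: l) := by
  induction l with
  | nil => intro a; rfl
  | cons b bs ih =>
      intro a
      show (if some b = some a then false else pvChainO (some b) bs) = pvNoAdj (a :: b :: bs)
      by_cases h : a = b
      · simp [h, pvNoAdj]
      · rw [if_neg (by simpa using fun e => h e.symm), ih b]
        simp [pvNoAdj, h]

theorem pvChainO_none (l : List Char) : pvChainO none l = pvNoAdj l := by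
  cases l with
  | nil => rfl
  | cons c cs =>
      show (if some c = none then false else pvChainO (some c) cs) = _
      rw [if_neg (by simp), pvChainO_some]

-- the doubled-substring characterisation of "no adjacent equals"
theorem pvNoAdj_iff (l : List Char) : pvNoAdj l = true ↔ ∀ c, ¬ [c, c] <:+: l := by
  induction l with
  | nil =>
      simp only [pvNoAdj, true_iff]
      intro c h
      have := h.length_le; simp at this
  | cons a t ih =>
      cases t with
      | nil =>
          simp only [pvNoAdj, true_iff]
          intro c h
          have := h.length_le; simp at this
      | cons b rest =>
          have hdec : ∀ c, [c, c] <:+: a :: b :: rest ↔ (c = a ∧ c = b) ∨ [c, c] <:+: b :: rest := by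
            intro c
            rw [List.infix_cons_iff]
            constructor
            · rintro (hp | hi)
              · left
                rcases (List.cons_prefix_cons.mp hp) with ⟨h1, hp2⟩
                rcases (List.cons_prefix_cons.mp hp2) with ⟨h2, _⟩
                exact ⟨h1, h2⟩
              · right; exact hi
            · rintro (⟨h1, h2⟩ | hi)
              · left; subst h1; subst h2
                exact List.cons_prefix_cons.mpr ⟨rfl, List.cons_prefix_cons.mpr ⟨rfl, List.nil_prefix⟩⟩
              · right; exact hi
          by_cases hab : a = b
          · subst hab
            refine iff_of_false (by simp [pvNoAdj]) ?_
            intro hall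
            exact hall a ((hdec a).mpr (Or.inl ⟨rfl, rfl⟩))
          · simp only [pvNoAdj, if_neg hab]
            rw [ih]
            constructor
            · intro h c hc
              rcases (hdec c).mp hc with ⟨h1, h2⟩ | hi
              · exact hab (h1 ▸ h2 ▸ rfl)
              · exact h c hi
            · intro h c hc
              exact h c ((hdec c).mpr (Or.inr hc))

theorem pvAll_eq_noAdj (l : List Char) :
    (l.all (fun c => !(decide ([c, c] <:+: l)))) = pvNoAdj l := by
  by_cases h : pvNoAdj l = true
  · rw [h, List.all_eq_true]
    intro c _
    simpa using (pvNoAdj_iff l).mp h c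
  · rw [eq_false_of_ne_true h, List.all_eq_false]
    have hne : ¬ ∀ c, ¬ [c, c] <:+: l := fun hall => h ((pvNoAdj_iff l).mpr hall)
    rcases not_forall.mp hne with ⟨c, hc⟩
    rw [not_not] at hc
    exact ⟨c, hc.subset (by simp), by simpa using hc⟩

-- ===== VERDICT =====
theorem has_different_starting_letter_spec : Claim_equal_has_different_starting_letter := by
  intro s _
  unfold Spec_has_different_starting_letter has_different_starting_letter has_different_starting_letter_alt
  have hfl : (PySem.Str.lower (String.ofList
      (((PySem.Str.split₀ s).map (fun w => pvB_firstChar w.toList)).flatten))).toList =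
      ((PySem.Str.split₀ s).map (fun w => (pvB_firstChar w.toList).map PySem.Chars.lowerChar)).flatten := by
    simp [PySem.Str.toList_lower, PySem.Chars.lower, List.map_flatten, Function.comp_def]
  rw [hfl]
  have := pvLoop_eq_chain (PySem.Str.split₀ s) none
  simp only [pvEnc] at this
  rw [this, pvChainO_none, pvAll_eq_noAdj]
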